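-- pv_equiv track=rewrite | github.com/sunilbpandey/project-euler | src/P051/p051.py | generate_family
-- ===== SOURCE A (Python) =====
-- def generate_family(num: str, mask: tuple[int, int, int]) -> list[str]:
--     family: list[str] = []
--     digits = range(1, 10) if 0 in mask else range(10)
--     for digit in digits:
--         family.append(
--             "".join(str(digit) if i in mask else n for i, n in enumerate(num))
--         )
--     return family
-- ===== SOURCE B (Python) =====
-- def generate_family(num: str, mask: tuple[int, int, int]) -> list[str]:
--     # Build a template once: the literal segments of num between masked positions.
--     segments: list[str] = []
--     cur: list[str] = []
--     for i, ch in enumerate(num):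
--         if i in mask:
--             segments.append("".join(cur))
--             cur = []
--         else:
--             cur.append(ch)
--     segments.append("".join(cur))
--     start = 1 if 0 in mask else 0
--     return [str(d).join(segments) for d in range(start, 10)]
-- ===== Notes on version B (the rewrite author's own statement) =====
-- stated objective: faster
-- what changed: B precomputes a template once (the literal segments of num between masked positions, via a single segmentation pass) and then produces each family member with a single str(d).join(segments), instead of A re-scanning every character with an `i in mask` membership test for each of the ten digits.
import Mathlib
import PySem

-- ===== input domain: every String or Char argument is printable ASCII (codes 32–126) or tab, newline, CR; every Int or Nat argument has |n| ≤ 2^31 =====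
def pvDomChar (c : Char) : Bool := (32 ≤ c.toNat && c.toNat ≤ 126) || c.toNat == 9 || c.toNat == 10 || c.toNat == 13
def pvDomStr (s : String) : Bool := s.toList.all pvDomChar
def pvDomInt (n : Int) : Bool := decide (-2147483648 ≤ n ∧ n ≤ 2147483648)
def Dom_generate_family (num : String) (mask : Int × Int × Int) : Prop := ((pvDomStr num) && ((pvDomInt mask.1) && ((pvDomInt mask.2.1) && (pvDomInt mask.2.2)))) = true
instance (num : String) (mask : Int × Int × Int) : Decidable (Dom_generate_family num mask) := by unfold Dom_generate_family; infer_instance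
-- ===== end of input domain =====

-- B precomputes the literal segments of num between masked positions once, then emits each
-- family member as str(d).join(segments), instead of A's per-digit per-character membership scan.

-- ===== PORT A =====
-- `i in mask` on the 3-tuple
def gf_inMask (x : Int) (m : Int × Int × Int) : Bool := x == m.1 || x == m.2.1 || x == m.2.2

def generate_family (num : String) (mask : Int × Int × Int) : List String :=
  let digits := if gf_inMask 0 mask then PySem.List.pyRange 1 10 1 else PySem.List.pyRange 0 10 1
  digits.foldl (fun family digit =>
    family ++ [String.mk ((PySem.List.enumerate num.toList 0).map
      (fun p => if gf_inMask p.1 mask then PySem.Int.toChars digit else [p.2])).flatten]) []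

-- ===== PORT B =====
-- segmentation pass: state = (finished segments, current segment)
def generate_family_alt (num : String) (mask : Int × Int × Int) : List String :=
  let st := (PySem.List.enumerate num.toList 0).foldl
    (fun (st : List (List Char) × List Char) p =>
      if gf_inMask p.1 mask then (st.1 ++ [st.2], []) else (st.1, st.2 ++ [p.2]))
    ([], [])
  let segments := st.1 ++ [st.2]
  let start : Int := if gf_inMask 0 mask then 1 else 0
  -- str(d).join(segments) ported as List.intercalate over char lists
  (PySem.List.pyRange start 10 1).map
    (fun d => String.mk (List.intercalate (PySem.Int.toChars d) segments))

-- ===== PRECONDITION & SPEC =====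
def Spec_generate_family (num : String) (mask : Int × Int × Int) (out : List String) : Prop := out = generate_family_alt num mask
instance (num : String) (mask : Int × Int × Int) (out : List String) : Decidable (Spec_generate_family num mask out) := by unfold Spec_generate_family; infer_instance

-- ===== CLAIM (what is proved, stated in full; the proofs are below) =====
def Claim_equal_generate_family : Prop := ∀ (num : String) (mask : Int × Int × Int), Dom_generate_family num mask → Spec_generate_family num mask (generate_family num mask)

-- ===== LEMMAS AND PROOFS =====

theorem gf_ic_cc (d a b : List Char) (xs : List (List Char)) :
    List.intercalate d (a :: b :: xs) = a ++ d ++ List.intercalate d (b :: xs) := by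
  simp [List.intercalate, List.intersperse]

-- appending into the last segment appends after the intercalation
theorem gf_ic_last (d y : List Char) (x : List Char) (xs : List (List Char)) :
    List.intercalate d (xs ++ [x ++ y]) = List.intercalate d (xs ++ [x]) ++ y := by
  induction xs with
  | nil => simp [List.intercalate]
  | cons a xs ih =>
    cases xs with
    | nil => simp [List.intercalate, List.intersperse]
    | cons b xs =>
      simp only [List.cons_append, gf_ic_cc]
      simp only [List.cons_append] at ih
      simp [ih]

-- starting a fresh empty segment appends the separator (nonempty prefix)
theorem gf_ic_push (d : List Char) (x : List Char) (xs : List (List Char)) :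
    List.intercalate d ((xs ++ [x]) ++ [[]]) = List.intercalate d (xs ++ [x]) ++ d := by
  induction xs with
  | nil => simp [List.intercalate, List.intersperse]
  | cons a xs ih =>
    cases xs with
    | nil => simp [List.intercalate, List.intersperse]
    | cons b xs =>
      simp only [List.cons_append, gf_ic_cc]
      simpa using ih

-- the invariant of B's segmentation pass, against A's per-character row
theorem gf_seg_fold (mask : Int × Int × Int) (d : List Char) (ps : List (Int × Char)) :
    ∀ (segs : List (List Char)) (cur : List Char),
    List.intercalate d
      ((ps.foldl (fun (st : List (List Char) × List Char) p =>
          if gf_inMask p.1 mask then (st.1 ++ [st.2], []) else (st.1, st.2 ++ [p.2]))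
        (segs, cur)).1 ++
       [(ps.foldl (fun (st : List (List Char) × List Char) p =>
          if gf_inMask p.1 mask then (st.1 ++ [st.2], []) else (st.1, st.2 ++ [p.2]))
        (segs, cur)).2]) =
    List.intercalate d (segs ++ [cur]) ++
      (ps.map (fun p => if gf_inMask p.1 mask then d else [p.2])).flatten := by
  induction ps with
  | nil => simp
  | cons p ps ih =>
    intro segs cur
    simp only [List.foldl_cons, List.map_cons, List.flatten_cons]
    by_cases h : gf_inMask p.1 mask
    · rw [if_pos h, if_pos h, ih, gf_ic_push]
      simp
    · rw [if_neg h, if_neg h, ih, gf_ic_last]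
      simp

-- A's accumulator fold is a map
theorem gf_foldl_map (ds : List Int) (g : Int → String) :
    ∀ acc : List String,
      ds.foldl (fun family digit => family ++ [g digit]) acc = acc ++ ds.map g := by
  induction ds with
  | nil => simp
  | cons d ds ih => intro acc; simp [List.foldl_cons, ih]

-- ===== VERDICT (by name: the statement is the Claim_ definition above) =====
theorem generate_family_spec : Claim_equal_generate_family := by
  intro num mask _
  unfold Spec_generate_family generate_family generate_family_alt
  simp only []
  rw [gf_foldl_map]
  have hrange : (if gf_inMask 0 mask then PySem.List.pyRange 1 10 1 else PySem.List.pyRange 0 10 1)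
      = PySem.List.pyRange (if gf_inMask 0 mask then (1:Int) else 0) 10 1 := by
    by_cases h : gf_inMask 0 mask <;> simp [h]
  rw [hrange, List.nil_append]
  apply List.map_congr_left
  intro d _
  congr 1
  have := gf_seg_fold mask (PySem.Int.toChars d) (PySem.List.enumerate num.toList 0) [] []
  rw [this]
  simp [List.intercalate]
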